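-- pv_equiv track=rewrite | github.com/DrWeeny/dw_coding | dw_maya/dw_maya_utils/dw_maya_components.py | create_maya_ranges
-- ===== SOURCE A (Python) =====
-- import itertools
-- from typing import Iterable, List, Generator, Tuple, Optional, Set
--
-- ComponentID = int
--
-- ComponentRange = str
--
-- def create_maya_ranges(indices: List[ComponentID]) -> List[ComponentRange]:
--     """
--     Convert indices to Maya range notation.
--
--     Args:
--         indices: List of component indices
--
--     Returns:
--         List of range strings
--
--     Example:
--         >>> create_maya_ranges([0, 1, 2, 3, 5, 6, 7])
--         ['0:3', '5:7']
--     """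
--     ranges = []
--     for _, group in itertools.groupby(enumerate(sorted(indices)), lambda x: x[1] - x[0]):
--         group = list(group)
--         start = group[0][1]
--         end = group[-1][1]
--
--         ranges.append(
--             f"{start}" if start == end else f"{start}:{end}")
--
--     return ranges
-- ===== SOURCE B (Python) =====
-- def create_maya_ranges(indices):
--     """Collapse indices into Maya range strings via an explicit run loop."""
--     out = []
--     vals = sorted(indices)
--     if not vals:
--         return out
--     start = prev = vals[0]
--     for v in vals[1:]:
--         if v != prev + 1:
--             out.append(f"{start}" if start == prev else f"{start}:{prev}")
--             start = v
--         prev = v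
--     out.append(f"{start}" if start == prev else f"{start}:{prev}")
--     return out
-- ===== Notes on version B (the rewrite author's own statement) =====
-- stated objective: simpler
-- what changed: Replaces the enumerate+itertools.groupby-on-(value-index) trick and the per-group list materialisation with a single explicit pass over the sorted values that keeps a current run's start/prev and emits a range whenever the next value is not prev+1.
import Mathlib
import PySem

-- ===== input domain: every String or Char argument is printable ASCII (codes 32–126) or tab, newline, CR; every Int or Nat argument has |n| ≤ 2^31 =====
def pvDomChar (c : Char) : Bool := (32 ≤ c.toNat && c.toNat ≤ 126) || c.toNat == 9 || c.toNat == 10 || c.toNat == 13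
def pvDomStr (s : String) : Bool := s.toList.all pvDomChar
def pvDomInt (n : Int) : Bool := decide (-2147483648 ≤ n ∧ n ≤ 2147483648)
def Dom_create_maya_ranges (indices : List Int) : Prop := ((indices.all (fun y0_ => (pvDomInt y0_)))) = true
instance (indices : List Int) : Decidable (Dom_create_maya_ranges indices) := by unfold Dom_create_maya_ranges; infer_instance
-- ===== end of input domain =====

-- B replaces the enumerate + groupby-on-(value-index) trick by one explicit run loop
-- over the sorted values (simpler decomposition, same O(n log n) cost).

-- ===== PORT A =====
-- itertools.groupby(…, key) ported by hand: pvTakeRun takes the longest prefix with the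
-- given key (key of (i, v) is v - i, exactly A's lambda), pvGroupBy chains the groups.
def pvTakeRun (k : Int) : List (Int × Int) → (List (Int × Int)) × (List (Int × Int))
  | [] => ([], [])
  | p :: rest =>
    if p.2 - p.1 = k then ((p :: (pvTakeRun k rest).1), (pvTakeRun k rest).2)
    else ([], p :: rest)

theorem pvTakeRun_snd_le (k : Int) : ∀ (l : List (Int × Int)), (pvTakeRun k l).2.length ≤ l.length := by
  intro l
  induction l with
  | nil => simp [pvTakeRun]
  | cons p rest ih =>
    simp only [pvTakeRun]
    split
    · exact Nat.le_succ_of_le ih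
    · simp

def pvGroupBy : List (Int × Int) → List (List (Int × Int))
  | [] => []
  | p :: rest =>
    (p :: (pvTakeRun (p.2 - p.1) rest).1) :: pvGroupBy (pvTakeRun (p.2 - p.1) rest).2
termination_by l => l.length
decreasing_by
  exact Nat.lt_succ_of_le (pvTakeRun_snd_le _ _)

-- the loop body of A: start = group[0][1], end = group[-1][1], the f-string
def pvFmtGroup (g : List (Int × Int)) : String :=
  let start := (g.headD (0, 0)).2
  let e := (g.getLastD (0, 0)).2
  if start = e then PySem.Int.toStr start
  else PySem.Int.toStr start ++ ":" ++ PySem.Int.toStr e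

def create_maya_ranges (indices : List Int) : List String :=
  (pvGroupBy (PySem.List.enumerate (PySem.List.sorted indices (fun x => x)))).map pvFmtGroup

-- ===== PORT B =====
def pvEmit (a b : Int) : String :=
  if a = b then PySem.Int.toStr a
  else PySem.Int.toStr a ++ ":" ++ PySem.Int.toStr b

def pvAltLoop (start prev : Int) (out : List String) : List Int → List String
  | [] => out ++ [pvEmit start prev]
  | v :: rest =>
    if v ≠ prev + 1 then pvAltLoop v v (out ++ [pvEmit start prev]) rest
    else pvAltLoop start v out rest

def create_maya_ranges_alt (indices : List Int) : List String :=
  match PySem.List.sorted indices (fun x => x) with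
  | [] => []
  | v :: rest => pvAltLoop v v [] rest

-- ===== PRECONDITION & SPEC =====
def Spec_create_maya_ranges (indices : List Int) (out : List String) : Prop := out = create_maya_ranges_alt indices
instance (indices : List Int) (out : List String) : Decidable (Spec_create_maya_ranges indices out) := by unfold Spec_create_maya_ranges; infer_instance

-- ===== CLAIM (what is proved, stated in full; the proofs are below) =====
def Claim_equal_create_maya_ranges : Prop := ∀ (indices : List Int), Dom_create_maya_ranges indices → Spec_create_maya_ranges indices (create_maya_ranges indices)

-- ===== LEMMAS AND PROOFS =====

-- value of the last enumerated pair of a run, defaulting to the previous value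
def pvLastVal : List (Int × Int) → Int → Int
  | [], d => d
  | p :: t, _ => pvLastVal t p.2

theorem pvGetLastD_snd : ∀ (g : List (Int × Int)) (p : Int × Int),
    (g.getLastD p).2 = pvLastVal g p.2 := by
  intro g
  induction g with
  | nil => intro p; rfl
  | cons q t ih => intro p; rw [List.getLastD_cons]; exact ih q

theorem pvFmtGroup_cons (s v : Int) (g : List (Int × Int)) :
    pvFmtGroup ((s, v) :: g) = pvEmit v (pvLastVal g v) := by
  unfold pvFmtGroup pvEmit
  rw [List.getLastD_cons, pvGetLastD_snd]
  rfl

theorem pvAltLoop_acc (l : List Int) : ∀ (start prev : Int) (out : List String),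
    pvAltLoop start prev out l = out ++ pvAltLoop start prev [] l := by
  induction l with
  | nil => intro start prev out; simp [pvAltLoop]
  | cons v rest ih =>
    intro start prev out
    simp only [pvAltLoop]
    split
    · rw [ih, ih v v ([] ++ [pvEmit start prev])]
      simp
    · exact ih start v out

-- main invariant: mid-run with start/prev at enumeration index s, A's remaining
-- grouping rendered equals B's loop on the remaining values
theorem pvMain : ∀ (l : List Int) (s start prev : Int),
    (pvEmit start (pvLastVal (pvTakeRun (prev + 1 - s) (PySem.List.enumerate l s)).1 prev)
      :: (pvGroupBy (pvTakeRun (prev + 1 - s) (PySem.List.enumerate l s)).2).map pvFmtGroup)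
    = pvAltLoop start prev [] l := by
  intro l
  induction l with
  | nil => intro s start prev; simp [PySem.List.enumerate, pvTakeRun, pvGroupBy, pvAltLoop, pvLastVal]
  | cons v rest ih =>
    intro s start prev
    rw [PySem.List.enumerate_cons]
    by_cases h : v = prev + 1
    · -- run continues
      subst h
      simp only [pvTakeRun]
      rw [if_pos (by simp)]
      simp only [pvLastVal]
      have hk : prev + 1 - s = (prev + 1) + 1 - (s + 1) := by omega
      rw [hk, ih (s + 1) start (prev + 1)]
      simp [pvAltLoop]
    · -- run breaks
      have hk : ¬ ((v : Int) - s = prev + 1 - s) := by omega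
      simp only [pvTakeRun]
      rw [if_neg hk]
      simp only [pvGroupBy, List.map_cons, pvFmtGroup_cons]
      have hk2 : (v : Int) - s = v + 1 - (s + 1) := by omega
      rw [hk2, ih (s + 1) v v]
      simp only [pvAltLoop, if_pos h]
      rw [pvAltLoop_acc rest v v ([] ++ [pvEmit start prev])]
      simp [pvLastVal]

-- ===== VERDICT (by name: the statement is the Claim_ definition above) =====
theorem create_maya_ranges_spec : Claim_equal_create_maya_ranges := by
  intro indices _
  unfold Spec_create_maya_ranges create_maya_ranges create_maya_ranges_alt
  cases hs : PySem.List.sorted indices (fun x => x) with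
  | nil => simp [PySem.List.enumerate, pvGroupBy]
  | cons v rest =>
    rw [PySem.List.enumerate_cons]
    simp only [pvGroupBy, List.map_cons, pvFmtGroup_cons]
    have hk : v - 0 = v + 1 - (0 + 1) := by omega
    rw [hk, pvMain rest (0 + 1) v v]
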